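-- pv_equiv track=rewrite | github.com/tneuqole/advent-of-code | 2023/python/day14.py | roll
-- ===== SOURCE A (Python) =====
-- def tokenize(s):
--     tokens = []
--     t = ""
--     for c in s:
--         if c == "#":
--             if t:
--                 tokens.append(t)
--             tokens.append("#")
--             t = ""
--         else:
--             t += c
--     if t:
--         tokens.append(t)
--
--     return tokens
--
-- def roll(rows, left):
--     new = []
--     for r in rows:
--         parts = tokenize(r)
--         new_r = ""
--         for p in parts:
--             if p == "#":
--                 new_r += "#"
--                 continue
--
--             rocks = p.count("O")
--             if left:
--                 new_r += "O" * rocks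
--                 new_r += "." * (len(p) - rocks)
--             else:
--                 new_r += "." * (len(p) - rocks)
--                 new_r += "O" * rocks
--
--         new.append(new_r)
--
--     return new
-- ===== SOURCE B (Python) =====
-- def roll(rows, left):
--     return [_slide(r, left) for r in rows]
--
-- def _slide(r, left):
--     # Right tilt is the mirror image of a left tilt.
--     if not left:
--         return _slide(r[::-1], True)[::-1]
--     # Write-pointer pass: start from an all-'.' base (walls kept) and drop
--     # each rock at the leftmost free slot of its current wall-bounded run.
--     res = ['#' if c == '#' else '.' for c in r]
--     w = 0
--     for i, c in enumerate(r):
--         if c == '#':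
--             w = i + 1
--         elif c == 'O':
--             res[w] = 'O'
--             w += 1
--     return ''.join(res)
-- ===== Notes on version B (the rewrite author's own statement) =====
-- stated objective: alternative
-- what changed: Instead of tokenizing into '#'-delimited segments and count-filling each, B makes an all-dots base row (walls kept) and a single write-pointer pass that drops each rock at the leftmost free slot of its run, handling right tilt as the mirror (reverse, slide left, reverse).
import Mathlib
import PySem

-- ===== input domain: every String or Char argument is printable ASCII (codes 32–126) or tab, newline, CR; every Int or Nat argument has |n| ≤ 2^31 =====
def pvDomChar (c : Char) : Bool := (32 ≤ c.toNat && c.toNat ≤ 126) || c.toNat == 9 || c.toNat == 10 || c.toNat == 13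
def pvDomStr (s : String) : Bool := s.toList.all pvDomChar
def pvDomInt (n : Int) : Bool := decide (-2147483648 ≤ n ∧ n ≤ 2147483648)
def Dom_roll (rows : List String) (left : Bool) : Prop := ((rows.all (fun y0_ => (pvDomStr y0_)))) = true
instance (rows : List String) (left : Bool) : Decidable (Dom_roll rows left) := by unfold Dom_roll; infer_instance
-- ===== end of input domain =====

-- B replaces A's tokenize+count-fill with a write-pointer pass over an all-dots base row (right tilt = mirrored left tilt); objective: alternative algorithm, same cost.


-- ===== PORT A =====
-- one step of tokenize's loop body: state = (tokens, current run t)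
def tokenizeStep (st : List (List Char) × List Char) (c : Char) : List (List Char) × List Char :=
  if c = '#' then
    ((if st.2 ≠ [] then st.1 ++ [st.2] else st.1) ++ [['#']], [])
  else (st.1, st.2 ++ [c])

def tokenize (s : List Char) : List (List Char) :=
  let st := s.foldl tokenizeStep ([], [])
  if st.2 ≠ [] then st.1 ++ [st.2] else st.1

def roll (rows : List String) (left : Bool) : List String :=
  rows.map (fun r =>
    String.mk ((tokenize r.toList).foldl (fun acc p =>
      if p = ['#'] then acc ++ ['#']
      else
        let rocks := PySem.Chars.count p ['O']
        if left then (acc ++ List.replicate rocks 'O') ++ List.replicate (p.length - rocks) '.'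
        else (acc ++ List.replicate (p.length - rocks) '.') ++ List.replicate rocks 'O') []))

-- ===== PORT B =====
-- res[i] = c for Python lists: exact for in-range indices (negative = from the end);
-- Python raises IndexError out of range, which _slide's pass never does (w stays in range).
def pySetNN (l : List Char) (i : Int) (c : Char) : List Char :=
  if 0 ≤ i then l.set i.toNat c else l.set ((l.length : Int) + i).toNat c

-- the left-tilt pass of _slide: base row of '.'/'#', then enumerate-driven write pointer
def slideLeft (cs : List Char) : List Char :=
  let res0 := cs.map (fun c => if c = '#' then '#' else '.')
  let st := (PySem.List.enumerate cs 0).foldl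
    (fun (st : List Char × Int) (ic : Int × Char) =>
      if ic.2 = '#' then (st.1, ic.1 + 1)
      else if ic.2 = 'O' then (pySetNN st.1 st.2 'O', st.2 + 1)
      else st) (res0, 0)
  st.1

-- _slide: right tilt = reverse, slide left, reverse (r[::-1] ported as List.reverse)
def slideB (cs : List Char) (left : Bool) : List Char :=
  if left = false then (slideLeft cs.reverse).reverse
  else slideLeft cs

def roll_alt (rows : List String) (left : Bool) : List String :=
  rows.map (fun r => String.mk (slideB r.toList left))

-- ===== PRECONDITION & SPEC =====
def Spec_roll (rows : List String) (left : Bool) (out : List String) : Prop := out = roll_alt rows left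
instance (rows : List String) (left : Bool) (out : List String) : Decidable (Spec_roll rows left out) := by unfold Spec_roll; infer_instance

-- ===== CLAIM (what is proved, stated in full; the proofs are below) =====
def Claim_equal_roll : Prop := ∀ (rows : List String) (left : Bool), Dom_roll rows left → Spec_roll rows left (roll rows left)

-- ===== LEMMAS AND PROOFS =====

-- PySem.Chars.count with a single-char needle is List.count
lemma ccount_go (c : Char) : ∀ (fuel : Nat) (s : List Char) (acc : Nat), s.length ≤ fuel →
    PySem.Chars.count.go [c] fuel s acc = acc + s.count c := by
  intro fuel
  induction fuel with
  | zero =>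
    intro s acc h
    have hs : s = [] := List.length_eq_zero_iff.mp (Nat.le_zero.mp h)
    subst hs
    simp [PySem.Chars.count.go]
  | succ n ih =>
    intro s acc h
    cases s with
    | nil => simp [PySem.Chars.count.go]
    | cons a t =>
      have ht : t.length ≤ n := by simpa using Nat.lt_succ_iff.mp (by simpa using h)
      have hpre : List.isPrefixOf [c] (a :: t) = (c == a) := by simp [List.isPrefixOf]
      by_cases hac : c = a
      · subst hac
        simp only [PySem.Chars.count.go, hpre, BEq.rfl, if_true, List.length_cons,
          List.length_nil]
        rw [show List.drop 1 (c :: t) = t from rfl, ih t (acc + 1) ht]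
        have : (c == c) = true := by simp
        simp [List.count_cons, this]
        omega
      · have h1 : (c == a) = false := by simp [hac]
        have h2 : (a == c) = false := by
          simp only [beq_eq_false_iff_ne]
          exact fun hh => hac hh.symm
        simp only [PySem.Chars.count.go, hpre, h1, Bool.false_eq_true, if_false]
        rw [ih t acc ht]
        simp [List.count_cons, h1, h2]

lemma ccount (s : List Char) (c : Char) : PySem.Chars.count s [c] = s.count c := by
  unfold PySem.Chars.count
  simp only [List.isEmpty_cons, Bool.false_eq_true, if_false]
  simpa using ccount_go c s.length s 0 (le_refl _)

-- reference single-char split on '#'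
def spl : List Char → List (List Char)
  | [] => [[]]
  | c :: cs =>
    if c = '#' then [] :: spl cs
    else match spl cs with
      | [] => [[c]]
      | h :: t => (c :: h) :: t

-- count-and-dot fill of a wall-free segment
def fillSeg (left : Bool) (seg : List Char) : List Char :=
  let k := PySem.Chars.count seg ['O']
  let dots := List.replicate (seg.length - k) '.'
  if left then List.replicate k 'O' ++ dots else dots ++ List.replicate k 'O'

-- join with '#'
def joinH : List (List Char) → List Char
  | [] => []
  | [x] => x
  | x :: y :: t => x ++ '#' :: joinH (y :: t)

-- the reference value of one row
def rowRef (left : Bool) (cs : List Char) : List Char :=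
  joinH ((spl cs).map (fillSeg left))

lemma spl_ne_nil (cs : List Char) : spl cs ≠ [] := by
  cases cs with
  | nil => simp [spl]
  | cons c cs =>
    simp only [spl]
    split
    · simp
    · split <;> simp

lemma fillSeg_nil (left : Bool) : fillSeg left [] = [] := by
  cases left <;> rfl

-- the per-token contribution of A's inner loop
def stepTok (left : Bool) (p : List Char) : List Char :=
  if p = ['#'] then ['#'] else fillSeg left p

lemma foldA_eq_flatMap (left : Bool) (parts : List (List Char)) :
    ∀ acc : List Char,
      parts.foldl (fun acc p =>
        if p = ['#'] then acc ++ ['#']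
        else
          let rocks := PySem.Chars.count p ['O']
          if left then (acc ++ List.replicate rocks 'O') ++ List.replicate (p.length - rocks) '.'
          else (acc ++ List.replicate (p.length - rocks) '.') ++ List.replicate rocks 'O') acc
      = acc ++ parts.flatMap (stepTok left) := by
  induction parts with
  | nil => intro acc; simp
  | cons p ps ih =>
    intro acc
    simp only [List.foldl_cons, List.flatMap_cons, ih]
    by_cases hp : p = ['#']
    · simp [hp, stepTok]
    · cases left <;> simp [hp, stepTok, fillSeg, List.append_assoc]

lemma main_inv (left : Bool) :
    ∀ (cs t : List Char) (tk : List (List Char)), '#' ∉ t →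
      (if (cs.foldl tokenizeStep (tk, t)).2 ≠ [] then
          (cs.foldl tokenizeStep (tk, t)).1 ++ [(cs.foldl tokenizeStep (tk, t)).2]
        else (cs.foldl tokenizeStep (tk, t)).1).flatMap (stepTok left)
      = tk.flatMap (stepTok left) ++
          (match spl cs with
            | [] => []
            | h :: r => joinH (fillSeg left (t ++ h) :: r.map (fillSeg left))) := by
  intro cs
  induction cs with
  | nil =>
    intro t tk ht
    simp only [spl, List.foldl_nil]
    by_cases h0 : t = []
    · subst h0
      simp [fillSeg_nil, joinH]
    · have hne : t ≠ ['#'] := by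
        intro h; rw [h] at ht; simp at ht
      simp [h0, stepTok, hne, joinH]
  | cons c cs ih =>
    intro t tk ht
    by_cases hc : c = '#'
    · subst hc
      have hstep : tokenizeStep (tk, t) '#' = ((if t ≠ [] then tk ++ [t] else tk) ++ [['#']], []) := by
        simp [tokenizeStep]
      rw [List.foldl_cons, hstep, ih [] _ (by simp)]
      have h2 := spl_ne_nil cs
      cases hsp : spl cs with
      | nil => exact absurd hsp h2
      | cons h r =>
        simp only [spl, hsp]
        by_cases h0 : t = []
        · subst h0
          simp [stepTok, fillSeg_nil, joinH, List.append_assoc]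
        · have hne : t ≠ ['#'] := by
            intro h; rw [h] at ht; simp at ht
          simp [h0, stepTok, hne, joinH, List.append_assoc]
    · have hstep : tokenizeStep (tk, t) c = (tk, t ++ [c]) := by
        simp [tokenizeStep, hc]
      rw [List.foldl_cons, hstep]
      rw [ih (t ++ [c]) _ (by
        intro hmem
        rcases List.mem_append.mp hmem with h | h
        · exact ht h
        · simp at h; exact hc h.symm)]
      have h2 := spl_ne_nil cs
      cases hsp : spl cs with
      | nil => exact absurd hsp h2
      | cons h r =>
        simp only [spl, if_neg hc, hsp]
        simp [List.append_assoc]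

-- A's row equals the reference
lemma rowA_eq (left : Bool) (cs : List Char) :
    (tokenize cs).flatMap (stepTok left) = rowRef left cs := by
  unfold tokenize rowRef
  rw [main_inv left cs [] [] (by simp)]
  have h2 := spl_ne_nil cs
  cases hsp : spl cs with
  | nil => exact absurd hsp h2
  | cons h r => simp [hsp]

-- ---- B side: the write-pointer pass produces the left reference ----

-- dots accumulate into the head segment
lemma spl_dots (d : Nat) (cs : List Char) :
    spl (List.replicate d '.' ++ cs)
      = match spl cs with
        | [] => []
        | h :: t => (List.replicate d '.' ++ h) :: t := by
  induction d with
  | zero =>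
    have h2 := spl_ne_nil cs
    cases hsp : spl cs with
    | nil => exact absurd hsp h2
    | cons h t => simp [hsp]
  | succ n ih =>
    have h2 := spl_ne_nil cs
    cases hsp : spl cs with
    | nil => exact absurd hsp h2
    | cons h t =>
      simp only [List.replicate_succ, List.cons_append, spl, ih, hsp]
      simp

lemma dots_shift (d : Nat) (c : Char) (X : List Char) :
    List.replicate d c ++ c :: X = c :: (List.replicate d c ++ X) := by
  induction d with
  | zero => simp
  | succ n ih => simp [List.replicate_succ, ih]

abbrev Fl (cs : List Char) : List Char := rowRef true cs

lemma fill_dots (d : Nat) : fillSeg true (List.replicate d '.') = List.replicate d '.' := by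
  simp [fillSeg, ccount, List.count_replicate]

lemma Fl_dots (d : Nat) : Fl (List.replicate d '.') = List.replicate d '.' := by
  unfold Fl rowRef
  rw [show List.replicate d '.' = List.replicate d '.' ++ ([] : List Char) by simp, spl_dots]
  simp [spl, joinH, fill_dots]

lemma Fl_hash (d : Nat) (r : List Char) :
    Fl (List.replicate d '.' ++ '#' :: r) = List.replicate d '.' ++ '#' :: Fl r := by
  unfold Fl rowRef
  rw [spl_dots]
  have h2 := spl_ne_nil r
  cases hsp : spl r with
  | nil => exact absurd hsp h2
  | cons h t =>
    simp only [spl, hsp, List.map_cons, joinH]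
    simp [fill_dots, joinH]

lemma fill_rock (d : Nat) (h : List Char) :
    fillSeg true (List.replicate d '.' ++ 'O' :: h)
      = 'O' :: fillSeg true (List.replicate d '.' ++ h) := by
  have hcnt : (List.replicate d '.' ++ 'O' :: h).count 'O' = h.count 'O' + 1 := by
    simp [List.count_append, List.count_cons, List.count_replicate]
  have hcnt2 : (List.replicate d '.' ++ h).count 'O' = h.count 'O' := by
    simp [List.count_append, List.count_replicate]
  simp only [fillSeg, ccount, hcnt, hcnt2]
  have hL : (List.replicate d '.' ++ 'O' :: h).length - (h.count 'O' + 1)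
      = (List.replicate d '.' ++ h).length - h.count 'O' := by
    simp; omega
  rw [hL, List.replicate_succ]
  simp

lemma fill_other (d : Nat) (c : Char) (h : List Char) (hO : c ≠ 'O') :
    fillSeg true (List.replicate d '.' ++ c :: h)
      = fillSeg true (List.replicate (d + 1) '.' ++ h) := by
  have hc1 : (c == 'O') = false := by simp [hO]
  have hcnt : (List.replicate d '.' ++ c :: h).count 'O' = h.count 'O' := by
    simp [List.count_append, List.count_cons, List.count_replicate, hc1]
  have hcnt2 : (List.replicate (d + 1) '.' ++ h).count 'O' = h.count 'O' := by
    simp [List.count_append, List.count_replicate]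
  have hlen : (List.replicate d '.' ++ c :: h).length = (List.replicate (d + 1) '.' ++ h).length := by
    simp; omega
  simp only [fillSeg, ccount, hcnt, hcnt2, hlen]

lemma Fl_rock (d : Nat) (r : List Char) :
    Fl (List.replicate d '.' ++ 'O' :: r) = 'O' :: Fl (List.replicate d '.' ++ r) := by
  unfold Fl rowRef
  rw [spl_dots, spl_dots]
  have h2 := spl_ne_nil r
  cases hsp : spl r with
  | nil => exact absurd hsp h2
  | cons h t =>
    simp only [spl, hsp, show (('O' : Char) = '#') = False by simp, if_false]
    cases t with
    | nil => simp [joinH, fill_rock]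
    | cons y ys => simp [joinH, fill_rock]

lemma Fl_other (d : Nat) (c : Char) (r : List Char) (hc : c ≠ '#') (hO : c ≠ 'O') :
    Fl (List.replicate d '.' ++ c :: r) = Fl (List.replicate (d + 1) '.' ++ r) := by
  unfold Fl rowRef
  rw [spl_dots, spl_dots]
  have h2 := spl_ne_nil r
  cases hsp : spl r with
  | nil => exact absurd hsp h2
  | cons h t =>
    simp only [spl, hsp, if_neg hc]
    cases t with
    | nil => simp [joinH, fill_other d c h hO]
    | cons y ys => simp [joinH, fill_other d c h hO]

lemma set_mid (P X : List Char) (c c' : Char) :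
    (P ++ c :: X).set P.length c' = P ++ c' :: X := by
  induction P with
  | nil => simp
  | cons p ps ih => simp [List.set, ih]

-- the write-pointer invariant
lemma goL_inv (rest : List Char) :
    ∀ (P : List Char) (d : Nat),
      ((PySem.List.enumerate rest ((P.length : Int) + (d : Int))).foldl
        (fun (st : List Char × Int) (ic : Int × Char) =>
          if ic.2 = '#' then (st.1, ic.1 + 1)
          else if ic.2 = 'O' then (pySetNN st.1 st.2 'O', st.2 + 1)
          else st)
        (P ++ List.replicate d '.' ++ rest.map (fun c => if c = '#' then '#' else '.'),
          (P.length : Int))).1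
      = P ++ Fl (List.replicate d '.' ++ rest) := by
  induction rest with
  | nil =>
    intro P d
    simp [PySem.List.enumerate_nil, Fl_dots]
  | cons c rest ih =>
    intro P d
    rw [PySem.List.enumerate_cons, List.foldl_cons]
    by_cases hc : c = '#'
    · subst hc
      rw [Fl_hash]
      have h := ih (P ++ List.replicate d '.' ++ ['#']) 0
      simp only [List.replicate_zero, List.append_nil, List.length_append, List.length_replicate,
        List.length_cons, List.length_nil, Nat.cast_add, Nat.cast_zero, Nat.cast_one, add_zero,
        List.append_assoc, List.cons_append, List.nil_append] at h ⊢
      try simp only [if_pos rfl]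
      convert h using 3 <;> push_cast <;> ring
    · by_cases hO : c = 'O'
      · subst hO
        have hset : pySetNN (P ++ List.replicate d '.' ++
              ('O' :: rest).map (fun c => if c = '#' then '#' else '.')) ((P.length : Int)) 'O'
            = (P ++ ['O']) ++ List.replicate d '.' ++ rest.map (fun c => if c = '#' then '#' else '.') := by
          have hmap : ('O' :: rest).map (fun c => if c = '#' then '#' else '.')
              = '.' :: rest.map (fun c => if c = '#' then '#' else '.') := by
            simp
          rw [hmap]
          have hsh : P ++ List.replicate d '.' ++
              ('.' :: rest.map (fun c => if c = '#' then '#' else '.'))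
              = P ++ '.' :: (List.replicate d '.' ++ rest.map (fun c => if c = '#' then '#' else '.')) := by
            rw [List.append_assoc, dots_shift]
          unfold pySetNN
          rw [if_pos (by positivity), Int.toNat_natCast, hsh, set_mid]
          simp [List.append_assoc, dots_shift]
        rw [Fl_rock]
        have h := ih (P ++ ['O']) d
        simp only [List.length_append, List.length_cons, List.length_nil, Nat.cast_add,
          Nat.cast_one, Nat.cast_zero, add_zero, List.append_assoc, List.cons_append,
          List.nil_append] at h ⊢
        try simp only [show (('O' : Char) = '#') = False by simp, if_false, if_pos rfl]
        rw [show ((P.length : Int) + (d : Int)) + 1 = ((P.length : Int) + 1) + (d : Int) by ring]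
        have hset' := hset
        simp only [List.append_assoc, List.cons_append, List.nil_append] at hset'
        rw [hset']
        convert h using 3 <;> push_cast <;> ring
      · rw [show Fl (List.replicate d '.' ++ c :: rest) = Fl (List.replicate (d+1) '.' ++ rest)
            from Fl_other d c rest hc hO]
        have h := ih P (d + 1)
        simp only [Nat.cast_add, Nat.cast_one] at h
        have hmap : (c :: rest).map (fun x => if x = '#' then '#' else '.')
            = '.' :: rest.map (fun x => if x = '#' then '#' else '.') := by
          simp [hc]
        rw [hmap]
        have hsh : P ++ List.replicate d '.' ++ ('.' :: rest.map (fun x => if x = '#' then '#' else '.'))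
            = P ++ List.replicate (d + 1) '.' ++ rest.map (fun x => if x = '#' then '#' else '.') := by
          rw [List.append_assoc, dots_shift, List.append_assoc]
          simp [List.replicate_succ]
        simp only [if_neg hc, if_neg hO]
        rw [hsh]
        convert h using 3 <;> push_cast <;> ring

lemma slideLeft_eq (cs : List Char) : slideLeft cs = Fl cs := by
  unfold slideLeft
  have := goL_inv cs [] 0
  simpa using this

-- ---- the right tilt via reversal ----

lemma getLastD_snoc (X : List (List Char)) (z d : List Char) :
    (X ++ [z]).getLastD d = z := by
  simp [List.getLastD_eq_getLast?]

lemma spl_snoc_hash (l : List Char) : spl (l ++ ['#']) = spl l ++ [[]] := by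
  induction l with
  | nil => simp [spl]
  | cons c cs ih =>
    by_cases hc : c = '#'
    · simp [spl, hc, ih]
    · have h2 := spl_ne_nil cs
      cases hsp : spl cs with
      | nil => exact absurd hsp h2
      | cons h t => simp [spl, hc, ih, hsp]

lemma dlcc {α : Type} (a b : α) (l : List α) : (a :: b :: l).dropLast = a :: (b :: l).dropLast := rfl

lemma spl_snoc (l : List Char) (c : Char) (hc : c ≠ '#') :
    spl (l ++ [c]) = (spl l).dropLast ++ [(spl l).getLastD [] ++ [c]] := by
  induction l with
  | nil => simp [spl, hc]
  | cons b bs ih =>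
    cases hsp : spl bs with
    | nil => exact absurd hsp (spl_ne_nil bs)
    | cons h t =>
      by_cases hb : b = '#'
      · subst hb
        have e : spl (('#' :: bs) ++ [c]) = [] :: spl (bs ++ [c]) := by simp [spl]
        have e2 : spl ('#' :: bs) = [] :: h :: t := by simp [spl, hsp]
        rw [e, ih, hsp, e2, dlcc]
        simp [List.getLastD_cons]
      · have e2 : spl (b :: bs) = (b :: h) :: t := by simp [spl, hb, hsp]
        have e : spl ((b :: bs) ++ [c]) = match spl (bs ++ [c]) with
            | [] => [[b]]
            | h' :: t' => (b :: h') :: t' := by simp [spl, hb]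
        rw [e, ih, hsp, e2]
        cases t with
        | nil => simp
        | cons y ys =>
          rw [dlcc, dlcc]
          simp [List.getLastD_cons]

lemma spl_reverse (cs : List Char) :
    spl cs.reverse = ((spl cs).map List.reverse).reverse := by
  induction cs with
  | nil => simp [spl]
  | cons c cs ih =>
    by_cases hc : c = '#'
    · subst hc
      rw [List.reverse_cons, spl_snoc_hash, ih]
      simp [spl]
    · have h2 := spl_ne_nil cs
      cases hsp : spl cs with
      | nil => exact absurd hsp h2
      | cons h t =>
        rw [List.reverse_cons, spl_snoc _ _ hc, ih, hsp]
        have e2 : spl (c :: cs) = (c :: h) :: t := by simp [spl, hc, hsp]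
        rw [e2]
        simp only [List.map_cons, List.reverse_cons]
        rw [List.dropLast_concat, getLastD_snoc]

lemma fillSeg_reverse (seg : List Char) :
    fillSeg false seg = (fillSeg true seg.reverse).reverse := by
  simp [fillSeg, ccount, List.count_reverse, List.reverse_append, List.reverse_replicate]

lemma joinH_snoc (M : List (List Char)) (z : List Char) (hM : M ≠ []) :
    joinH (M ++ [z]) = joinH M ++ '#' :: z := by
  induction M with
  | nil => simp at hM
  | cons x xs ih =>
    cases xs with
    | nil => simp [joinH]
    | cons y ys =>
      have e : (x :: y :: ys) ++ [z] = x :: ((y :: ys) ++ [z]) := by simp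
      rw [e]
      have e2 : (y :: ys) ++ [z] = y :: (ys ++ [z]) := by simp
      rw [show joinH (x :: ((y :: ys) ++ [z])) = x ++ '#' :: joinH ((y :: ys) ++ [z]) by
        rw [e2]; rfl]
      rw [ih (by simp), joinH]
      simp [List.append_assoc]

lemma joinH_reverse (L : List (List Char)) :
    (joinH L).reverse = joinH (L.reverse.map List.reverse) := by
  induction L with
  | nil => simp [joinH]
  | cons x xs ih =>
    cases xs with
    | nil => simp [joinH]
    | cons y ys =>
      rw [joinH, List.reverse_append, List.reverse_cons, ih]
      have e : ((x :: y :: ys).reverse.map List.reverse : List (List Char))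
          = ((y :: ys).reverse.map List.reverse) ++ [x.reverse] := by simp
      rw [e, joinH_snoc _ _ (by simp)]
      simp

lemma rowRef_right (cs : List Char) :
    rowRef false cs = (Fl cs.reverse).reverse := by
  unfold Fl rowRef
  rw [spl_reverse, joinH_reverse]
  simp only [← List.map_reverse, List.reverse_reverse, List.map_map]
  congr 1
  apply List.map_congr_left
  intro seg _
  simp [Function.comp, fillSeg_reverse]

lemma slideB_eq (cs : List Char) (left : Bool) : slideB cs left = rowRef left cs := by
  cases left with
  | true => simp [slideB, slideLeft_eq, Fl]
  | false => simp [slideB, slideLeft_eq, rowRef_right]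

-- ===== VERDICT (by name: the statement is the Claim_ definition above) =====
theorem roll_spec : Claim_equal_roll := by
  intro rows left _
  unfold Spec_roll roll roll_alt
  apply List.map_congr_left
  intro r _
  rw [foldA_eq_flatMap, List.nil_append, rowA_eq, slideB_eq]
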